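-- pv_equiv track=rewrite | github.com/krzyszti/my_projects | Python/Exercises/lowest_index.py | solution
-- ===== SOURCE A (Python) =====
-- from collections import Counter
--
-- def solution(A):
--     v = Counter()
--     i = 0
--     for e in A:
--         if not (e in v):
--             v[e] += 1
--             i = e
--     return A.index(i)
-- ===== SOURCE B (Python) =====
-- def solution(A):
--     first = {}
--     for j, e in enumerate(A):
--         if e not in first:
--             first[e] = j
--     return max(first.values())
-- ===== Notes on version B (the rewrite author's own statement) =====
-- stated objective: faster
-- what changed: Instead of tracking the last new value in a Counter and re-scanning the whole list with A.index at the end, B builds a first-occurrence index table in one enumerate pass and returns the maximum recorded index, eliminating the final .index scan.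
-- outside the precondition, e.g. on solution([]): A raises ValueError, B raises ValueError
import Mathlib
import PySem

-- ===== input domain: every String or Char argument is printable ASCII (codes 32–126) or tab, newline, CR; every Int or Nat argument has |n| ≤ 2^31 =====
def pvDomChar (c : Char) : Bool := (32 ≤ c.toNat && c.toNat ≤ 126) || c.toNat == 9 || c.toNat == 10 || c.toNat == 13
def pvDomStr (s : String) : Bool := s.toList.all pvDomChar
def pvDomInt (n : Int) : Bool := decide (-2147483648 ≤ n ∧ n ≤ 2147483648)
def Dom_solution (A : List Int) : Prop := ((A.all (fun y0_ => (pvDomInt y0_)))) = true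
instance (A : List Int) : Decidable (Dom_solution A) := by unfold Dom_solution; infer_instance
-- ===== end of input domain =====

-- B replaces A's last-new-value Counter loop plus the final A.index rescan by a single
-- enumerate pass building a first-occurrence table, returning max(first.values()).

-- ===== PORT A =====
-- loop body: if not (e in v): v[e] += 1; i = e
def aStep (st : PySem.Dict Int Int × Int) (e : Int) : PySem.Dict Int Int × Int :=
  if st.1.contains e then st else (st.1.modify e 0 (· + 1), e)

def solution (A : List Int) : Int :=
  let st := A.foldl aStep (PySem.Dict.empty, 0)
  -- A.index(i): raises ValueError when i ∉ A (happens exactly on A = []); excluded by Pre_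
  Int.ofNat ((PySem.List.index? A st.2).getD 0)

-- ===== PORT B =====
-- loop body: if e not in first: first[e] = j
def bStep (d : PySem.Dict Int Int) (p : Int × Int) : PySem.Dict Int Int :=
  if d.contains p.2 then d else d.insert p.2 p.1

def solution_alt (A : List Int) : Int :=
  let first := (PySem.List.enumerate A 0).foldl bStep PySem.Dict.empty
  -- max(first.values()): raises ValueError on an empty table (A = []); excluded by Pre_
  (PySem.List.max? first.values (fun x => x)).getD 0

-- ===== PRECONDITION & SPEC =====
-- Pre_ excludes only A = [], where both programs raise ValueError (A.index(0) resp. max of empty).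
def Pre_solution (A : List Int) : Prop := A ≠ []
instance (A : List Int) : Decidable (Pre_solution A) := by unfold Pre_solution; infer_instance
def pvWitness_solution : List Int := ([1, 2, 1, 3, 2])

def Spec_solution (A : List Int) (out : Int) : Prop := out = solution_alt A
instance (A : List Int) (out : Int) : Decidable (Spec_solution A out) := by unfold Spec_solution; infer_instance

-- ===== CLAIM (what is proved, stated in full; the proofs are below) =====
def Claim_equal_solution : Prop := ∀ (A : List Int), Dom_solution A → Pre_solution A → Spec_solution A (solution A)

-- ===== LEMMAS AND PROOFS =====

-- A-side: the Counter's keys are exactly the elements seen so far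
theorem aFold_contains (A : List Int) (e : Int) :
    ∀ (st : PySem.Dict Int Int × Int),
      ((A.foldl aStep st).1).contains e = (st.1.contains e || decide (e ∈ A)) := by
  induction A with
  | nil => simp
  | cons x xs ih =>
    intro st
    simp only [List.foldl_cons, ih, aStep]
    by_cases hex : e = x
    · subst hex
      by_cases hc : st.1.contains e <;>
        simp [hc, PySem.Dict.contains_modify]
    · by_cases hc : st.1.contains x <;>
        simp [hc, hex, PySem.Dict.contains_modify, beq_false_of_ne hex]

-- A-side: the tracked value i comes from the initial state or the list
theorem aFold_snd_mem (A : List Int) :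
    ∀ (st : PySem.Dict Int Int × Int),
      (A.foldl aStep st).2 = st.2 ∨ (A.foldl aStep st).2 ∈ A := by
  induction A with
  | nil => simp
  | cons x xs ih =>
    intro st
    simp only [List.foldl_cons]
    rcases ih (aStep st x) with h | h
    · rw [h]; unfold aStep
      by_cases hc : st.1.contains x <;> simp [hc]
    · right; exact List.mem_cons_of_mem _ h

-- A-side: starting from the empty Counter, the tracked value lies in a nonempty list
theorem aFold_snd_mem_of_ne_nil (A : List Int) (i0 : Int) (h : A ≠ []) :
    (A.foldl aStep (PySem.Dict.empty, i0)).2 ∈ A := by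
  cases A with
  | nil => exact absurd rfl h
  | cons x t =>
    rw [List.foldl_cons]
    have hstep : aStep (PySem.Dict.empty, i0) x = (PySem.Dict.empty.modify x 0 (· + 1), x) := by
      simp [aStep, PySem.Dict.contains_empty]
    rw [hstep]
    rcases aFold_snd_mem t (PySem.Dict.empty.modify x 0 (· + 1), x) with hh | hh
    · rw [hh]; exact List.mem_cons_self
    · exact List.mem_cons_of_mem _ hh

-- B-side: the table's keys are exactly the elements seen so far
theorem bFold_contains (A : List Int) (e : Int) :
    ∀ (s : Int) (d : PySem.Dict Int Int),
      ((PySem.List.enumerate A s).foldl bStep d).contains e = (d.contains e || decide (e ∈ A)) := by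
  induction A with
  | nil => simp [PySem.List.enumerate_nil]
  | cons x xs ih =>
    intro s d
    rw [PySem.List.enumerate_cons, List.foldl_cons, ih]
    by_cases hex : e = x
    · subst hex
      by_cases hc : d.contains e <;> simp [bStep, hc]
    · by_cases hc : d.contains x <;>
        simp [bStep, hc, hex, PySem.Dict.contains_insert, beq_false_of_ne hex]

-- B-side: every recorded first-occurrence index is below the running counter's end
theorem bFold_values_lt (A : List Int) :
    ∀ (s : Int) (d : PySem.Dict Int Int), (∀ w ∈ d.values, w < s) →
      ∀ w ∈ ((PySem.List.enumerate A s).foldl bStep d).values, w < s + A.length := by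
  induction A with
  | nil => intro s d h w hw; simpa [PySem.List.enumerate_nil] using h w hw
  | cons x xs ih =>
    intro s d h w hw
    rw [PySem.List.enumerate_cons, List.foldl_cons] at hw
    have hstep : ∀ w ∈ (bStep d (s, x)).values, w < s + 1 := by
      intro w hw
      unfold bStep at hw
      by_cases hc : d.contains x
      · simp only [hc, if_pos] at hw
        exact lt_trans (h w hw) (by omega)
      · simp only [hc, Bool.false_eq_true, if_neg, not_false_iff] at hw
        rcases PySem.Dict.mem_values_insert d x s w hw with rfl | hmem
        · omega
        · exact lt_trans (h w hmem) (by omega)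
    have := ih (s + 1) (bStep d (s, x)) hstep w hw
    simp only [List.length_cons] at *
    omega

-- max of a list whose appended last element dominates all others
theorem max?_append_singleton_top (vs : List Int) (m : Int) (h : ∀ w ∈ vs, w ≤ m) :
    PySem.List.max? (vs ++ [m]) (fun x => x) = some m := by
  cases hmx : PySem.List.max? (vs ++ [m]) (fun x => x) with
  | none =>
    rw [PySem.List.max?_eq_none_iff] at hmx
    simp at hmx
  | some w =>
    have hwmem := PySem.List.max?_mem hmx
    have hwle : w ≤ m := by
      rcases List.mem_append.mp hwmem with hv | hm
      · exact h w hv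
      · simp at hm; omega
    have hmle : m ≤ w := by
      have := PySem.List.max?_isMax hmx m (by simp)
      simpa using this
    exact congrArg some (le_antisymm hwle hmle)

theorem main_equiv (A : List Int) (h : A ≠ []) : solution A = solution_alt A := by
  induction A using List.reverseRecOn with
  | nil => exact absurd rfl h
  | append_singleton xs x ih =>
    unfold solution solution_alt
    rw [List.foldl_append]
    rw [show PySem.List.enumerate (xs ++ [x]) 0
          = PySem.List.enumerate xs 0 ++ [((0 + xs.length : Int), x)] from by
        rw [PySem.List.enumerate_append]; rfl]
    rw [List.foldl_append]
    simp only [List.foldl_cons, List.foldl_nil]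
    set stx := xs.foldl aStep (PySem.Dict.empty, 0) with hstx
    set dx := (PySem.List.enumerate xs 0).foldl bStep PySem.Dict.empty with hdx
    by_cases hx : x ∈ xs
    · have hxs : xs ≠ [] := by rintro rfl; simp at hx
      have hca : stx.1.contains x = true := by
        rw [hstx, aFold_contains]; simp [hx]
      have hcb : dx.contains x = true := by
        rw [hdx, bFold_contains]; simp [hx]
      rw [show aStep stx x = stx from by simp [aStep, hca]]
      rw [show bStep dx ((0 + xs.length : Int), x) = dx from by simp [bStep, hcb]]
      have hi : stx.2 ∈ xs := aFold_snd_mem_of_ne_nil xs 0 hxs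
      rw [PySem.List.index?_append_of_mem [x] hi]
      exact ih hxs
    · have hca : stx.1.contains x = false := by
        rw [hstx, aFold_contains]; simp [hx]
      have hcb : dx.contains x = false := by
        rw [hdx, bFold_contains]; simp [hx]
      rw [show (aStep stx x).2 = x from by simp [aStep, hca]]
      rw [show bStep dx ((0 + xs.length : Int), x) = dx.insert x (0 + xs.length : Int) from by
        simp [bStep, hcb]]
      rw [PySem.List.index?_append_singleton_self xs x hx]
      have hvals : (dx.insert x (0 + xs.length : Int)).values
          = dx.values ++ [(0 + xs.length : Int)] := by
        simp [PySem.Dict.values, PySem.Dict.items_insert_of_not_contains dx _ hcb]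
      rw [hvals]
      have hbound : ∀ w ∈ dx.values, w ≤ (0 + xs.length : Int) := by
        intro w hw
        have := bFold_values_lt xs 0 PySem.Dict.empty
          (by simp [PySem.Dict.values, PySem.Dict.empty]) w (hdx ▸ hw)
        omega
      rw [max?_append_singleton_top _ _ hbound]
      simp

-- ===== VERDICT (by name: the statement is the Claim_ definition above) =====
theorem solution_spec : Claim_equal_solution := by
  intro A _ hpre
  unfold Spec_solution
  exact main_equiv A hpre
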